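-- pv_equiv track=rewrite | github.com/reyesruiz/shopify_tools | src/com_digitalruiz_shopify_tools/shopify_tools.py | get_size_order_position
-- ===== SOURCE A (Python) =====
-- def get_size_order_position(variant_size, sizes):
--     '''
--     get size position
--     '''
--     position = 1000
--     count = 0
--     for size in sizes:
--         for keyword in size['keywords']:
--             if variant_size.lower() == keyword.lower():
--                 position = count
--                 break
--         count = count + 1
--     return position
-- ===== SOURCE B (Python) =====
-- def get_size_order_position(variant_size, sizes):
--     for i in range(len(sizes) - 1, -1, -1):
--         if any(variant_size.lower() == kw.lower() for kw in sizes[i]['keywords']):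
--             return i
--     return 1000
-- ===== Notes on version B (the rewrite author's own statement) =====
-- stated objective: alternative
-- what changed: Replaces the forward fold that keeps overwriting a position/counter pair with a reverse index scan that returns the first (i.e. last-in-order) matching index immediately.
import Mathlib
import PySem

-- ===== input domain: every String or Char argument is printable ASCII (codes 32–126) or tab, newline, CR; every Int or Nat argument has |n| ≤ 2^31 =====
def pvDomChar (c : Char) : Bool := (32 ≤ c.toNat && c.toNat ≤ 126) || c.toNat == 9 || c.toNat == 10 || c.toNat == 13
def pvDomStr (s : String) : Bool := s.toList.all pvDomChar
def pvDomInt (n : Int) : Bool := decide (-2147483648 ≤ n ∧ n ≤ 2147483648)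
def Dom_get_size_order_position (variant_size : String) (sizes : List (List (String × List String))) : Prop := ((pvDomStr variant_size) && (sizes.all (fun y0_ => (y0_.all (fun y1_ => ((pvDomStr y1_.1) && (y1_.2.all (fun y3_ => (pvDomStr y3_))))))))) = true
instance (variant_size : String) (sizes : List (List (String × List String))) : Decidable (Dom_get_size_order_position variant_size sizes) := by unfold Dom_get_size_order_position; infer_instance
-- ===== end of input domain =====

-- B replaces A's forward fold (position overwritten at every match, counter carried along) by a
-- reverse index scan returning the first match from the end immediately; same worst-case cost,
-- plainer control flow (objective: alternative).

-- ===== PORT A =====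
-- forward fold carrying (position, count); the inner 'for … break' is the first matching keyword
def get_size_order_position (variant_size : String) (sizes : List (List (String × List String))) : Int :=
  let r := sizes.foldl (fun (st : Int × Int) size =>
    let kws := (List.lookup "keywords" size).getD []
    let position :=
      match kws.find? (fun kw => PySem.Str.lower variant_size == PySem.Str.lower kw) with
      | some _ => st.2
      | none => st.1
    (position, st.2 + 1)) ((1000 : Int), (0 : Int))
  r.1

-- ===== PORT B =====
-- scan of range(len(sizes)-1, -1, -1); early return on the first matching index
def pvAltScan (variant_size : String) (sizes : List (List (String × List String))) : List Int → Int
  | [] => 1000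
  | i :: rest =>
    let kws := ((PySem.List.pyGet? sizes i).getD []).lookup "keywords" |>.getD []
    if kws.any (fun kw => PySem.Str.lower variant_size == PySem.Str.lower kw) then i
    else pvAltScan variant_size sizes rest

def get_size_order_position_alt (variant_size : String) (sizes : List (List (String × List String))) : Int :=
  pvAltScan variant_size sizes (PySem.List.pyRange ((sizes.length : Int) - 1) (-1) (-1))

-- ===== PRECONDITION & SPEC =====
-- Pre_ excludes exactly the inputs where some size dict lacks the key "keywords",
-- on which Python A raises KeyError.
def Pre_get_size_order_position (variant_size : String) (sizes : List (List (String × List String))) : Prop :=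
  ∀ d ∈ sizes, (List.lookup "keywords" d).isSome = true
instance (variant_size : String) (sizes : List (List (String × List String))) : Decidable (Pre_get_size_order_position variant_size sizes) := by unfold Pre_get_size_order_position; infer_instance

def pvWitness_get_size_order_position : String × (List (List (String × List String))) :=
  ("M", [[("keywords", ["S", "small"])], [("keywords", ["m", "Medium"])]])

def Spec_get_size_order_position (variant_size : String) (sizes : List (List (String × List String))) (out : Int) : Prop := out = get_size_order_position_alt variant_size sizes
instance (variant_size : String) (sizes : List (List (String × List String))) (out : Int) : Decidable (Spec_get_size_order_position variant_size sizes out) := by unfold Spec_get_size_order_position; infer_instance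

-- ===== CLAIM (what is proved, stated in full; the proofs are below) =====
def Claim_equal_get_size_order_position : Prop := ∀ (variant_size : String) (sizes : List (List (String × List String))), Dom_get_size_order_position variant_size sizes → Pre_get_size_order_position variant_size sizes → Spec_get_size_order_position variant_size sizes (get_size_order_position variant_size sizes)

-- ===== LEMMAS AND PROOFS =====

-- whether one size entry matches the variant size
def pvMatch (vs : String) (d : List (String × List String)) : Bool :=
  ((List.lookup "keywords" d).getD []).any (fun kw => PySem.Str.lower vs == PySem.Str.lower kw)

-- index (from the front) of the last matching size, if any
def pvLast (vs : String) : List (List (String × List String)) → Option Nat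
  | [] => none
  | x :: xs =>
    match pvLast vs xs with
    | some j => some (j + 1)
    | none => if pvMatch vs x then some 0 else none

theorem pvMatch_eq (vs : String) (d : List (String × List String)) :
    pvMatch vs d =
      (((List.lookup "keywords" d).getD []).find?
        (fun kw => PySem.Str.lower vs == PySem.Str.lower kw)).isSome := by
  unfold pvMatch
  rw [Bool.eq_iff_iff]
  rw [List.any_eq_true, List.find?_isSome]

theorem pvLast_cons (vs : String) (x : List (String × List String))
    (xs : List (List (String × List String))) :
    pvLast vs (x :: xs) =
      match pvLast vs xs with
      | some j => some (j + 1)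
      | none => if pvMatch vs x then some 0 else none := rfl

theorem pvA_char (vs : String) (xs : List (List (String × List String))) :
    ∀ p0 c0 : Int,
      (xs.foldl (fun (st : Int × Int) size =>
        let kws := (List.lookup "keywords" size).getD []
        let position :=
          match kws.find? (fun kw => PySem.Str.lower vs == PySem.Str.lower kw) with
          | some _ => st.2
          | none => st.1
        (position, st.2 + 1)) (p0, c0)) =
      ((match pvLast vs xs with | some j => c0 + (j : Int) | none => p0), c0 + xs.length) := by
  induction xs with
  | nil => intro p0 c0; simp [pvLast]
  | cons x xs ih =>
    intro p0 c0
    simp only [List.foldl_cons]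
    rw [ih]
    rw [pvLast_cons]
    cases h : ((List.lookup "keywords" x).getD []).find?
        (fun kw => PySem.Str.lower vs == PySem.Str.lower kw) with
    | none =>
      have hm : pvMatch vs x = false := by rw [pvMatch_eq, h]; rfl
      cases hL : pvLast vs xs <;>
        simp [h, hm, hL, Prod.ext_iff] <;> (try constructor) <;> push_cast <;>
        first | ring | omega | rfl
    | some y =>
      have hm : pvMatch vs x = true := by rw [pvMatch_eq, h]; rfl
      cases hL : pvLast vs xs <;>
        simp [h, hm, hL, Prod.ext_iff] <;> (try constructor) <;> push_cast <;>
        first | ring | omega | rfl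

theorem pvAltScan_append (vs : String) (xs : List (List (String × List String)))
    (x : List (String × List String)) (r : List Int)
    (hr : ∀ i ∈ r, 0 ≤ i ∧ i < (xs.length : Int)) :
    pvAltScan vs (xs ++ [x]) r = pvAltScan vs xs r := by
  induction r with
  | nil => rfl
  | cons i rest ih =>
    obtain ⟨h0, hlt⟩ := hr i (List.mem_cons_self ..)
    have hget : PySem.List.pyGet? (xs ++ [x]) i = PySem.List.pyGet? xs i := by
      rw [PySem.List.pyGet?_of_nonneg _ h0, PySem.List.pyGet?_of_nonneg _ h0]
      rw [List.getElem?_append_left (by omega)]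
    unfold pvAltScan
    rw [hget, ih (fun j hj => hr j (List.mem_cons_of_mem _ hj))]

theorem pvLast_snoc (vs : String) (xs : List (List (String × List String)))
    (x : List (String × List String)) :
    pvLast vs (xs ++ [x]) = if pvMatch vs x then some xs.length else pvLast vs xs := by
  induction xs with
  | nil => by_cases hx : pvMatch vs x <;> simp [pvLast, hx]
  | cons y ys ihy =>
    simp only [List.cons_append, pvLast_cons, ihy]
    by_cases hx : pvMatch vs x <;> cases hys : pvLast vs ys <;> simp [hx, hys]

theorem pvB_char (vs : String) (xs : List (List (String × List String))) :
    pvAltScan vs xs (PySem.List.pyRange ((xs.length : Int) - 1) (-1) (-1)) =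
      (match pvLast vs xs with | some j => (j : Int) | none => 1000) := by
  induction xs using List.reverseRecOn with
  | nil =>
    rw [PySem.List.pyRange_neg_one_eq_nil (by simp)]
    simp [pvAltScan, pvLast]
  | append_singleton xs x ih =>
    have hlen : ((xs ++ [x]).length : Int) - 1 = (xs.length : Int) := by simp
    rw [hlen, PySem.List.pyRange_neg_one_cons (by omega)]
    unfold pvAltScan
    have hget : PySem.List.pyGet? (xs ++ [x]) (xs.length : Int) = some x :=
      PySem.List.pyGet?_append_length xs [] x
    rw [hget, pvLast_snoc]
    simp only [Option.getD_some]
    have hcond : ((List.lookup "keywords" x).getD []).any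
        (fun kw => PySem.Str.lower vs == PySem.Str.lower kw) = pvMatch vs x := rfl
    simp only [hcond]
    by_cases hx : pvMatch vs x = true
    · simp [hx]
    · rw [Bool.not_eq_true] at hx
      simp only [hx, Bool.false_eq_true, if_false]
      rw [pvAltScan_append vs xs x _ (by
        intro i hi
        rw [PySem.List.mem_pyRange_neg_one] at hi
        omega)]
      rw [ih]

-- ===== VERDICT (by name: the statement is the Claim_ definition above) =====
theorem get_size_order_position_spec : Claim_equal_get_size_order_position := by
  intro vs sizes _ _
  unfold Spec_get_size_order_position get_size_order_position get_size_order_position_alt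
  rw [pvA_char, pvB_char]
  cases pvLast vs sizes <;> simp
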